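-- pv_equiv track=rewrite | github.com/jd-opensource/9n-mpc | example/mnist_data/make_data.py | repartition_and_sort
-- ===== SOURCE A (Python) =====
-- def convert_n_bytes(n, b):
--     bits = b * 8
--     return (int)(((n + 2 ** (bits - 1)) % (2 ** bits) - 2 ** (bits - 1)) & 0xfffffff)
--
-- def convert_4_bytes(n):
--     return convert_n_bytes(n, 4)
--
-- def getHashCode(s):
--     """
--     getHashCode of java
--     """
--     h = 0
--     n = len(s)
--     for i, c in enumerate(s):
--         h = h + ord(c) * 31 ** (n - 1 - i)
--     return convert_4_bytes(h)
--
-- def repartition_and_sort(dataset, n_partition=10):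
--     """
--     partition by example_id
--     and sort in each partiton
--     """
--     output = [[] for i in range(n_partition)]
--     for example_id, pb_str in dataset:
--         partition_id = getHashCode(example_id) % n_partition
--         output[partition_id].append((example_id, pb_str))
--     for partition in output:
--         partition.sort(key=lambda x: x[0])
--     return output
-- ===== SOURCE B (Python) =====
-- def convert_n_bytes(n, b):
--     bits = b * 8
--     return (int)(((n + 2 ** (bits - 1)) % (2 ** bits) - 2 ** (bits - 1)) & 0xfffffff)
--
-- def convert_4_bytes(n):
--     return convert_n_bytes(n, 4)
--
-- def getHashCode(s):
--     """
--     getHashCode of java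
--     """
--     h = 0
--     n = len(s)
--     for i, c in enumerate(s):
--         h = h + ord(c) * 31 ** (n - 1 - i)
--     return convert_4_bytes(h)
--
-- def repartition_and_sort(dataset, n_partition=10):
--     """Decorate each row with its partition id once, then build each partition
--     directly by an outer loop over partition ids (filter by that id, sort),
--     instead of distributing rows into mutable buckets first."""
--     keyed = [(getHashCode(eid) % n_partition, eid, pb) for eid, pb in dataset]
--     return [sorted(((eid, pb) for p, eid, pb in keyed if p == i),
--                    key=lambda row: row[0])
--             for i in range(n_partition)]
-- ===== Notes on version B (the rewrite author's own statement) =====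
-- stated objective: alternative
-- what changed: A distributes rows into mutable buckets indexed by hash and then sorts every bucket in place; B loops over partition ids instead, building each partition directly as sorted(filter(hash == id, dataset)) with no mutable buckets.
import Mathlib
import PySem

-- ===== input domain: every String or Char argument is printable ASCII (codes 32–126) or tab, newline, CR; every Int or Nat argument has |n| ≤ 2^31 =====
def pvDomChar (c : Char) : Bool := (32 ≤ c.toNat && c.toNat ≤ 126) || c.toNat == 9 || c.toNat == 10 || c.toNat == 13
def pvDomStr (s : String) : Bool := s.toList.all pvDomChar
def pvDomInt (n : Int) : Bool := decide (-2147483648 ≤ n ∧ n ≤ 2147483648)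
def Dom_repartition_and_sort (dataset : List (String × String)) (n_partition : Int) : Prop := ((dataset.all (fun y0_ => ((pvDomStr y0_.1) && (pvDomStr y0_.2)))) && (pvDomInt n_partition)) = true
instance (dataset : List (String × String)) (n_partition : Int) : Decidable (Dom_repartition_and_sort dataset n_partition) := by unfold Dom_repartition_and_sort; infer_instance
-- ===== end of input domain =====

-- B decorates each row with its partition id once, then builds each partition directly by an
-- outer loop over partition ids (filter by that id, then sort) instead of A's
-- distribute-into-buckets-then-sort-each (alternative decomposition); return-value equivalence only.

-- ===== PORT A =====
def convert_n_bytes (n : Int) (b : Int) : Int :=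
  let bits := b * 8
  PySem.Int.band (PySem.Int.mod (n + 2 ^ (bits - 1).toNat) (2 ^ bits.toNat) - 2 ^ (bits - 1).toNat) 0xfffffff

def convert_4_bytes (n : Int) : Int := convert_n_bytes n 4

def getHashCode (s : String) : Int :=
  let cs := s.toList
  let n := cs.length
  let h := (PySem.List.enumerate cs).foldl
    (fun h ic => h + (ic.2.toNat : Int) * 31 ^ ((n : Int) - 1 - ic.1).toNat) 0
  convert_4_bytes h

def repartition_and_sort (dataset : List (String × String)) (n_partition : Int) : List (List (String × String)) :=
  let output : List (List (String × String)) := (PySem.List.pyRange 0 n_partition 1).map (fun _ => [])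
  let output := dataset.foldl (fun out xp =>
      let partition_id := PySem.Int.mod (getHashCode xp.1) n_partition
      out.modify partition_id.toNat (fun part => part ++ [xp])) output
  output.map (fun part => PySem.List.sorted part (fun x => x.1))

-- ===== PORT B =====
def repartition_and_sort_alt (dataset : List (String × String)) (n_partition : Int) : List (List (String × String)) :=
  let keyed := dataset.map (fun r => (PySem.Int.mod (getHashCode r.1) n_partition, r.1, r.2))
  (PySem.List.pyRange 0 n_partition 1).map (fun i =>
    PySem.List.sorted
      ((keyed.filter (fun t => decide (t.1 = i))).map (fun t => (t.2.1, t.2.2)))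
      (fun row => row.1))

-- ===== PRECONDITION & SPEC =====
-- Pre_ excludes exactly the inputs where Python A raises: a nonempty dataset with
-- n_partition ≤ 0 (ZeroDivisionError for n_partition = 0, IndexError for n_partition < 0).
def Pre_repartition_and_sort (dataset : List (String × String)) (n_partition : Int) : Prop :=
  dataset = [] ∨ 1 ≤ n_partition
instance (dataset : List (String × String)) (n_partition : Int) : Decidable (Pre_repartition_and_sort dataset n_partition) := by unfold Pre_repartition_and_sort; infer_instance

def pvWitness_repartition_and_sort : (List (String × String)) × Int := ([("a", "x"), ("b", "y")], 2)

def Spec_repartition_and_sort (dataset : List (String × String)) (n_partition : Int) (out : List (List (String × String))) : Prop := out = repartition_and_sort_alt dataset n_partition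
instance (dataset : List (String × String)) (n_partition : Int) (out : List (List (String × String))) : Decidable (Spec_repartition_and_sort dataset n_partition out) := by unfold Spec_repartition_and_sort; infer_instance

-- ===== CLAIM (what is proved, stated in full; the proofs are below) =====
def Claim_equal_repartition_and_sort : Prop := ∀ (dataset : List (String × String)) (n_partition : Int), Dom_repartition_and_sort dataset n_partition → Pre_repartition_and_sort dataset n_partition → Spec_repartition_and_sort dataset n_partition (repartition_and_sort dataset n_partition)

-- ===== LEMMAS AND PROOFS =====

-- A's distribution fold, bucket by bucket: bucket i collects exactly the rows hashing to i
theorem distribute_getElem? (f : String × String → Nat) :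
    ∀ (l : List (String × String)) (out : List (List (String × String))) (i : Nat),
    (l.foldl (fun out xp => out.modify (f xp) (fun part => part ++ [xp])) out)[i]? =
      out[i]?.map (fun b => b ++ l.filter (fun xp => decide (f xp = i))) := by
  intro l
  induction l with
  | nil =>
    intro out i
    cases h : out[i]? <;> simp [h]
  | cons x l ih =>
    intro out i
    simp only [List.foldl_cons, ih]
    by_cases hfx : f x = i
    · subst hfx
      simp [Option.map_map, Function.comp_def]
    · rw [List.getElem?_modify]
      simp [hfx]

-- ===== VERDICT (by name: the statement is the Claim_ definition above) =====
theorem repartition_and_sort_spec : Claim_equal_repartition_and_sort := by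
  intro dataset n_partition _ hpre
  unfold Spec_repartition_and_sort repartition_and_sort repartition_and_sort_alt
  simp only [List.filter_map, List.map_map, Function.comp_def]
  apply List.ext_getElem?
  intro i
  rw [List.getElem?_map, List.getElem?_map,
    distribute_getElem? (fun xp => (PySem.Int.mod (getHashCode xp.1) n_partition).toNat),
    List.getElem?_map]
  cases hR : (PySem.List.pyRange 0 n_partition 1)[i]? with
  | none => simp
  | some v =>
    have hlen : i < (PySem.List.pyRange 0 n_partition 1).length :=
      List.getElem?_eq_some_iff.mp hR |>.1
    have hv : v = (i : Int) := by
      rcases List.getElem?_eq_some_iff.mp hR with ⟨hlt, he⟩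
      rw [PySem.List.getElem_pyRange_one] at he
      omega
    simp only [Option.map_some, Option.some.injEq]
    rw [List.nil_append]
    rcases hpre with hds | hn
    · subst hds; simp
    · rw [show (fun x : String × String => (x.1, x.2)) = id from rfl, List.map_id]
      congr 1
      apply List.filter_congr
      intro xp _
      have hmodnn : 0 ≤ PySem.Int.mod (getHashCode xp.1) n_partition := by
        rw [PySem.Int.mod_eq_emod_of_pos (by omega)]
        exact Int.emod_nonneg _ (by omega)
      subst hv
      simp only [decide_eq_decide]
      omega
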